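-- pv_equiv track=rewrite | github.com/yiming1012/MyLeetCode | LeetCode/数组/915. 分割数组.py | partitionDisjoint3
-- ===== SOURCE A (Python) =====
-- def partitionDisjoint3(A: 'List[int]') -> 'int':
--     lmaxv = A[0]
--     maxv = A[0]
--     l = 0
--
--     for i in range(len(A)):
--         if A[i] < lmaxv:
--             lmaxv = maxv
--             l = i
--         if A[i] > maxv:
--             maxv = A[i]
--
--     return l + 1
-- ===== SOURCE B (Python) =====
-- def partitionDisjoint3(A: 'List[int]') -> 'int':
--     # suffmin[i] = min(A[i+1:]), built back to front for the tail of A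
--     suffmin = []
--     for v in reversed(A[1:]):
--         suffmin.append(v if not suffmin or v < suffmin[-1] else suffmin[-1])
--     suffmin.reverse()
--     prefmax = A[0]
--     cut = 1
--     for v, m in zip(A, suffmin):
--         if v > prefmax:
--             prefmax = v
--         if prefmax <= m:
--             return cut
--         cut += 1
--     return cut
-- ===== Notes on version B (the rewrite author's own statement) =====
-- stated objective: alternative
-- what changed: Replaces the single-pass last-violation tracker (lmaxv/maxv/l state machine) by the classic suffix-minimum array plus a forward prefix-max scan that early-returns at the first valid cut.
import Mathlib
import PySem

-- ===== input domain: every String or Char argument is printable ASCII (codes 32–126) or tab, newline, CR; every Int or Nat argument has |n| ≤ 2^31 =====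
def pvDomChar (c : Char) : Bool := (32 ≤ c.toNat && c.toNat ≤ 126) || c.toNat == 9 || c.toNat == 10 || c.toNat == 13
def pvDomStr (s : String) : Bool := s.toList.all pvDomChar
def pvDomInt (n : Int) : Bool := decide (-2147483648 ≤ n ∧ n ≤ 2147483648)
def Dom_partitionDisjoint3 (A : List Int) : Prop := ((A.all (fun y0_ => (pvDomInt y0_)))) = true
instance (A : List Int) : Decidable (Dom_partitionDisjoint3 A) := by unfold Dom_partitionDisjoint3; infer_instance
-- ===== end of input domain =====

-- B replaces A's single-pass last-violation state machine by a suffix-minimum array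
-- plus a forward prefix-max scan returning at the first valid cut (alternative algorithm, same cost).

-- ===== PORT A =====
-- loop body of A: on each element, first the lmaxv/l update, then the maxv update
def pvStepA (A : List Int) (s : Int × Int × Int) (i : Int) : Int × Int × Int :=
  let ai := PySem.List.pyGetD A i 0   -- the index is produced by range(len(A)), so always in range
  let lmaxv := s.1; let maxv := s.2.1; let l := s.2.2
  let lmaxv2 := if ai < lmaxv then maxv else lmaxv
  let l2 := if ai < lmaxv then i else l
  let maxv2 := if ai > maxv then ai else maxv
  (lmaxv2, maxv2, l2)

def partitionDisjoint3 (A : List Int) : Int :=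
  let a0 := PySem.List.pyGetD A 0 0   -- the first element; Pre_ excludes the empty list, where Python raises IndexError
  let s := (PySem.List.pyRange 0 (A.length : Int) 1).foldl (pvStepA A) (a0, a0, 0)
  s.2.2 + 1

-- ===== PORT B =====
-- `for v in reversed(A[1:]): suffmin.append(min-so-far)` then `suffmin.reverse()`:
-- building back-to-front and reversing is the foldr that conses each running minimum.
def pvSuffmins (xs : List Int) : List Int :=
  xs.foldr (fun v acc =>
    (match acc with
     | [] => v
     | m :: _ => if v < m then v else m) :: acc) []

-- the `for v, m in zip(A, suffmin)` loop with early return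
def pvScanB : List (Int × Int) → Int → Int → Int
  | [], _, cut => cut
  | (v, m) :: rest, prefmax, cut =>
    let p := if v > prefmax then v else prefmax
    if p ≤ m then cut else pvScanB rest p (cut + 1)

def partitionDisjoint3_alt (A : List Int) : Int :=
  let suffmin := pvSuffmins (A.drop 1)
  pvScanB (A.zip suffmin) (PySem.List.pyGetD A 0 0) 1

-- ===== PRECONDITION & SPEC =====
-- Pre_ excludes only the empty list, on which Python A raises IndexError reading the first element.
def Pre_partitionDisjoint3 (A : List Int) : Prop := A ≠ []
instance (A : List Int) : Decidable (Pre_partitionDisjoint3 A) := by unfold Pre_partitionDisjoint3; infer_instance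
def pvWitness_partitionDisjoint3 : List Int := [5, 0, 3, 8, 6]

def Spec_partitionDisjoint3 (A : List Int) (out : Int) : Prop := out = partitionDisjoint3_alt A
instance (A : List Int) (out : Int) : Decidable (Spec_partitionDisjoint3 A out) := by unfold Spec_partitionDisjoint3; infer_instance

-- ===== CLAIM (what is proved, stated in full; the proofs are below) =====
def Claim_equal_partitionDisjoint3 : Prop := ∀ (A : List Int), Dom_partitionDisjoint3 A → Pre_partitionDisjoint3 A → Spec_partitionDisjoint3 A (partitionDisjoint3 A)

-- ===== LEMMAS AND PROOFS =====

-- max of x :: l, min of y :: ys, and the common validity predicate: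
-- pvValid x xs k : the cut after x and the first k elements of the tail xs is valid.
def pvMx (x : Int) (l : List Int) : Int := l.foldl max x
def pvMn (y : Int) (ys : List Int) : Int := ys.foldl min y
def pvValid (x : Int) (xs : List Int) (k : Nat) : Prop := ∀ y ∈ xs.drop k, pvMx x (xs.take k) ≤ y

-- ---- generic facts ----
lemma pvIfMax (p v : Int) : (if v > p then v else p) = max p v := by
  by_cases h : v > p
  · simp [h, max_eq_right (le_of_lt h)]
  · simp [h, max_eq_left (not_lt.mp h)]

lemma le_pvMn_iff (p y : Int) (ys : List Int) : p ≤ pvMn y ys ↔ ∀ z ∈ y :: ys, p ≤ z := by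
  constructor
  · intro h z hz
    rcases List.mem_cons.mp hz with rfl | hz
    · exact h.trans (PySem.List.foldl_min_le ys z).1
    · exact h.trans ((PySem.List.foldl_min_le ys y).2 z hz)
  · intro h
    rcases PySem.List.foldl_min_mem ys y with he | he
    · rw [pvMn, he]; exact h y List.mem_cons_self
    · exact h _ (List.mem_cons_of_mem _ he)

lemma pvMx_take_succ (x : Int) (xs : List Int) (k : Nat) (h : k < xs.length) :
    pvMx x (xs.take (k + 1)) = max (pvMx x (xs.take k)) xs[k] := by
  have h1 : xs.take (k + 1) = xs.take k ++ [xs[k]] := by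
    rw [List.take_add_one, List.getElem?_eq_getElem h]; rfl
  rw [pvMx, h1, List.foldl_append]
  rfl

lemma pvMx_take_mono (x : Int) (xs : List Int) {k j : Nat} (h : k ≤ j) :
    pvMx x (xs.take k) ≤ pvMx x (xs.take j) := by
  have h1 : xs.take k = (xs.take j).take k := by rw [List.take_take, min_eq_left h]
  have h2 : xs.take j = xs.take k ++ (xs.take j).drop k := by rw [h1, List.take_append_drop]
  rw [h2]
  show List.foldl max x _ ≤ List.foldl max x (xs.take k ++ (xs.take j).drop k)
  rw [List.foldl_append]
  exact (PySem.List.le_foldl_max _ _).1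

lemma pvMem_drop (xs : List Int) {j k : Nat} (hjk : j ≤ k) (hk : k < xs.length) :
    xs[k] ∈ xs.drop j := by
  obtain ⟨m, rfl⟩ : ∃ m, k = j + m := ⟨k - j, by omega⟩
  have h2 : m < (xs.drop j).length := by simp [List.length_drop]; omega
  exact List.mem_iff_getElem.mpr ⟨m, h2, List.getElem_drop⟩

lemma pvNotValid_of_small (x : Int) (xs : List Int) {j k : Nat} (hjk : j ≤ k) (hk : k < xs.length)
    (h : xs[k] < pvMx x (xs.take j)) : ¬ pvValid x xs j := by
  intro hv
  exact absurd (hv _ (pvMem_drop xs hjk hk)) (not_le.mpr h)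

-- ---- B side: pvSuffmins / pvScanB equal the reference scan pvGo, which finds the first valid cut ----
def pvGo : Int → Int → List Int → Int
  | _, c, [] => c
  | p, c, y :: ys => if p ≤ pvMn y ys then c else pvGo (max p y) (c + 1) ys

lemma pvSuffmins_cons (y : Int) (ys : List Int) :
    pvSuffmins (y :: ys) = pvMn y ys :: pvSuffmins ys := by
  induction ys generalizing y with
  | nil => simp [pvSuffmins, pvMn]
  | cons z zs ih =>
    have hz := ih z
    show (match pvSuffmins (z :: zs) with
          | [] => y
          | m :: _ => if y < m then y else m) :: pvSuffmins (z :: zs) = _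
    rw [hz]
    have hmin : (if y < pvMn z zs then y else pvMn z zs) = min y (pvMn z zs) := by
      by_cases hy : y < pvMn z zs
      · simp [hy, min_eq_left hy.le]
      · simp [hy, min_eq_right (not_lt.mp hy)]
    have hassoc : pvMn y (z :: zs) = min y (pvMn z zs) := by
      haveI : Std.Associative (min : Int → Int → Int) := ⟨fun a b c => min_assoc a b c⟩
      show zs.foldl min (min y z) = min y (zs.foldl min z)
      exact List.foldl_assoc
    simp only [hmin, hassoc]

lemma pvScan_eq_go (xs : List Int) : ∀ (x p c : Int),
    pvScanB ((x :: xs).zip (pvSuffmins xs)) p c = pvGo (max p x) c xs := by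
  induction xs with
  | nil => intro x p c; simp [pvSuffmins, pvScanB, pvGo]
  | cons y ys ih =>
    intro x p c
    simp only [pvSuffmins_cons, List.zip_cons_cons, pvScanB, pvIfMax]
    by_cases hc : max p x ≤ pvMn y ys
    · simp [pvGo, hc]
    · simp [pvGo, hc, ih y (max p x) (c + 1)]

lemma pvGo_first (t : List Int) : ∀ (x : Int) (xs : List Int) (k : Nat), t = xs.drop k →
    ∃ d : Nat, pvGo (pvMx x (xs.take k)) ((k : Int) + 1) t = ((k + d : Nat) : Int) + 1 ∧
      pvValid x xs (k + d) ∧ ∀ j : Nat, k ≤ j → j < k + d → ¬ pvValid x xs j := by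
  induction t with
  | nil =>
    intro x xs k ht
    refine ⟨0, by simp [pvGo], ?_, by omega⟩
    intro y hy
    rw [Nat.add_zero, ← ht] at hy
    exact absurd hy (List.not_mem_nil)
  | cons y ys ih =>
    intro x xs k ht
    have hk : k < xs.length := by
      by_contra hge
      rw [List.drop_eq_nil_iff.mpr (by omega)] at ht
      exact List.cons_ne_nil y ys ht
    have hcons : xs.drop k = xs[k] :: xs.drop (k + 1) := List.drop_eq_getElem_cons hk
    have ht2 := ht
    rw [hcons] at ht2
    have hy : y = xs[k] := (List.cons.inj ht2).1
    have hys : ys = xs.drop (k + 1) := (List.cons.inj ht2).2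
    by_cases hle : pvMx x (xs.take k) ≤ pvMn y ys
    · refine ⟨0, by simp [pvGo, hle], ?_, by omega⟩
      intro z hz
      rw [Nat.add_zero, ← ht] at hz
      exact (le_pvMn_iff _ y ys).mp hle z hz
    · obtain ⟨d', hval, hv, hmin⟩ := ih x xs (k + 1) hys
      refine ⟨d' + 1, ?_, ?_, ?_⟩
      · rw [pvGo]
        simp only [hle, if_false]
        have hmax : max (pvMx x (xs.take k)) y = pvMx x (xs.take (k + 1)) := by
          rw [hy, ← pvMx_take_succ x xs k hk]
        rw [hmax]
        have hc1 : ((k : Int) + 1) + 1 = ((k + 1 : Nat) : Int) + 1 := by push_cast; ring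
        rw [hc1, hval]
        congr 1
        push_cast
        ring
      · have : k + (d' + 1) = (k + 1) + d' := by omega
        rw [this]; exact hv
      · intro j hj1 hj2
        rcases Nat.eq_or_lt_of_le hj1 with rfl | hj
        · intro hvj
          apply hle
          rw [le_pvMn_iff]
          intro z hz
          rw [ht] at hz
          exact hvj z hz
        · exact hmin j (by omega) (by omega)

-- ---- A side: the fold over enumerated pairs, and its invariant ----
def pvStepA2 (s : Int × Int × Int) (pr : Int × Int) : Int × Int × Int :=
  let ai := pr.2
  let lmaxv := s.1; let maxv := s.2.1; let l := s.2.2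
  let lmaxv2 := if ai < lmaxv then maxv else lmaxv
  let l2 := if ai < lmaxv then pr.1 else l
  let maxv2 := if ai > maxv then ai else maxv
  (lmaxv2, maxv2, l2)

lemma pvFold_bridge (A : List Int) (init : Int × Int × Int) :
    (PySem.List.pyRange 0 (A.length : Int) 1).foldl (pvStepA A) init =
      (PySem.List.enumerate A 0).foldl pvStepA2 init := by
  rw [PySem.List.enumerate_eq_map_pyRange A 0, List.foldl_map]
  rfl

lemma pvFoldA_inv (t : List Int) : ∀ (x : Int) (xs : List Int) (k l : Nat) (lm mv : Int),
    t = xs.drop k → l ≤ k →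
    mv = pvMx x (xs.take k) → lm = pvMx x (xs.take l) →
    (∀ y ∈ (xs.take k).drop l, lm ≤ y) →
    (∀ j : Nat, j < l → ¬ pvValid x xs j) →
    ∃ L : Nat, ((PySem.List.enumerate t ((k : Int) + 1)).foldl pvStepA2 (lm, mv, (l : Int))).2.2 = (L : Int) ∧
      pvValid x xs L ∧ ∀ j : Nat, j < L → ¬ pvValid x xs j := by
  induction t with
  | nil =>
    intro x xs k l lm mv ht hl hmv hlm hbet hinv
    refine ⟨l, by simp [PySem.List.enumerate_nil], ?_, hinv⟩
    have hlen : xs.length ≤ k := by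
      by_contra hlt
      rw [List.drop_eq_getElem_cons (by omega)] at ht
      exact List.cons_ne_nil _ _ ht.symm
    have htake : xs.take k = xs := List.take_of_length_le hlen
    intro z hz
    rw [← hlm]
    exact hbet z (by rw [htake]; exact hz)
  | cons a t' ih =>
    intro x xs k l lm mv ht hl hmv hlm hbet hinv
    have hk : k < xs.length := by
      by_contra hge
      rw [List.drop_eq_nil_iff.mpr (by omega)] at ht
      exact List.cons_ne_nil a t' ht
    have hcons : xs.drop k = xs[k] :: xs.drop (k + 1) := List.drop_eq_getElem_cons hk
    have ht2 := ht; rw [hcons] at ht2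
    have ha : a = xs[k] := (List.cons.inj ht2).1
    have ht' : t' = xs.drop (k + 1) := (List.cons.inj ht2).2
    have hlmmv : lm ≤ mv := by rw [hlm, hmv]; exact pvMx_take_mono x xs hl
    rw [PySem.List.enumerate_cons]
    rw [List.foldl_cons]
    have hc1 : (k : Int) + 1 + 1 = ((k + 1 : Nat) : Int) + 1 := by push_cast; ring
    by_cases hv : a < lm
    · have hstep : pvStepA2 (lm, mv, (l : Int)) ((k : Int) + 1, a) = (mv, mv, ((k + 1 : Nat) : Int)) := by
        have hna : ¬ a > mv := not_lt.mpr (hv.le.trans hlmmv)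
        simp [pvStepA2, hv, hna]
      rw [hstep, hc1]
      have hmx1 : pvMx x (xs.take (k + 1)) = mv := by
        rw [pvMx_take_succ x xs k hk, ← ha, ← hmv, max_eq_left (hv.le.trans hlmmv)]
      apply ih x xs (k + 1) (k + 1) mv mv ht' le_rfl hmx1.symm hmx1.symm
      · intro z hz
        simp at hz
      · intro j hj
        rcases Nat.lt_or_ge j l with hjl | hjl
        · exact hinv j hjl
        · refine pvNotValid_of_small x xs (by omega) hk ?_
          rw [← ha]
          exact lt_of_lt_of_le hv (by rw [hlm]; exact pvMx_take_mono x xs hjl)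
    · have hstep : pvStepA2 (lm, mv, (l : Int)) ((k : Int) + 1, a) =
          (lm, if a > mv then a else mv, (l : Int)) := by
        simp [pvStepA2, hv]
      rw [hstep, hc1]
      have hmx2 : (if a > mv then a else mv) = pvMx x (xs.take (k + 1)) := by
        rw [pvIfMax, pvMx_take_succ x xs k hk, ← ha, ← hmv]
      apply ih x xs (k + 1) l lm _ ht' (by omega) hmx2 hlm
      · intro z hz
        have htk : xs.take (k + 1) = xs.take k ++ [xs[k]] := by
          rw [List.take_add_one, List.getElem?_eq_getElem hk]; rfl
        rw [htk, List.drop_append_of_le_length (by simp [List.length_take]; omega)] at hz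
        rcases List.mem_append.mp hz with hz1 | hz2
        · exact hbet z hz1
        · rw [List.mem_singleton.mp hz2, ← ha]
          exact not_lt.mp hv
      · exact hinv

-- ---- assembly ----
lemma pvPortA_char (x : Int) (xs : List Int) :
    ∃ L : Nat, partitionDisjoint3 (x :: xs) = (L : Int) + 1 ∧
      pvValid x xs L ∧ ∀ j : Nat, j < L → ¬ pvValid x xs j := by
  obtain ⟨L, h1, h2, h3⟩ := pvFoldA_inv xs x xs 0 0 x x (by simp) le_rfl rfl rfl (by simp) (by omega)
  refine ⟨L, ?_, h2, h3⟩
  show ((PySem.List.pyRange 0 ((x :: xs).length : Int) 1).foldl (pvStepA (x :: xs))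
      (PySem.List.pyGetD (x :: xs) 0 0, PySem.List.pyGetD (x :: xs) 0 0, 0)).2.2 + 1 = (L : Int) + 1
  rw [pvFold_bridge]
  have hx0 : PySem.List.pyGetD (x :: xs) 0 0 = x := by simp [pysem]
  rw [hx0, PySem.List.enumerate_cons, List.foldl_cons]
  have hstep0 : pvStepA2 (x, x, 0) ((0 : Int), x) = (x, x, ((0 : Nat) : Int)) := by
    simp [pvStepA2]
  have hc : (0 : Int) + 1 = ((0 : Nat) : Int) + 1 := by norm_num
  rw [hstep0, hc, h1]

lemma pvPortB_char (x : Int) (xs : List Int) :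
    ∃ d : Nat, partitionDisjoint3_alt (x :: xs) = (d : Int) + 1 ∧
      pvValid x xs d ∧ ∀ j : Nat, j < d → ¬ pvValid x xs j := by
  obtain ⟨d, h1, h2, h3⟩ := pvGo_first xs x xs 0 (by simp)
  refine ⟨d, ?_, by simpa using h2, fun j hj => by simpa using h3 j (by omega) (by omega)⟩
  show pvScanB ((x :: xs).zip (pvSuffmins ((x :: xs).drop 1))) (PySem.List.pyGetD (x :: xs) 0 0) 1 = (d : Int) + 1
  have hx0 : PySem.List.pyGetD (x :: xs) 0 0 = x := by simp [pysem]
  rw [hx0]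
  show pvScanB ((x :: xs).zip (pvSuffmins xs)) x 1 = (d : Int) + 1
  rw [pvScan_eq_go xs x x 1, max_self]
  have hmx : pvMx x (xs.take 0) = x := rfl
  have hc : ((0 : Nat) : Int) + 1 = 1 := by norm_num
  rw [hmx, hc] at h1
  rw [h1]
  push_cast
  ring

-- ===== VERDICT (by name: the statement is the Claim_ definition above) =====
theorem partitionDisjoint3_spec : Claim_equal_partitionDisjoint3 := by
  intro A _ hpre
  rcases A with _ | ⟨x, xs⟩
  · exact absurd rfl hpre
  unfold Spec_partitionDisjoint3
  obtain ⟨L, hL, hLv, hLmin⟩ := pvPortA_char x xs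
  obtain ⟨d, hd, hdv, hdmin⟩ := pvPortB_char x xs
  have : L = d := by
    rcases lt_trichotomy L d with h | h | h
    · exact absurd hLv (hdmin L h)
    · exact h
    · exact absurd hdv (hLmin d h)
  rw [hL, hd, this]
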